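-- pv_equiv track=rewrite | github.com/Stephanie1700/P7-2-Python-Project | app.py | analyze_arbitrary_segments
-- ===== SOURCE A (Python) =====
-- def split_words(sentence):
--     clean_sentence = ""
--     for char in sentence:   # LOOP: check every character
--         if char.isalpha() or char == " " or char == "-":   # keep letters, spaces, and "-" To steph: do you need the '
--             clean_sentence += char.lower()
--     words = clean_sentence.split()   # split into words
--     return words
--
-- def sentiment_score(sentence, afinn):
--     words = split_words(sentence)
--     score = 0
--     for word in words:
--         if word in afinn:
--             score = score + afinn[word]
--     return score
--
-- def analyze_arbitrary_segments(sentences, afinn):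
--     # Compute sentence scores
--     scores = [sentiment_score(s, afinn) for s in sentences]
--
--     n = len(scores)
--     best_pos = (None, None, float("-inf"))  # (start, end, score)
--     best_neg = (None, None, float("inf"))   # (start, end, score)
--
--     # Try all possible segments
--     for i in range(n):
--         current_sum = 0
--         for j in range(i, n):
--             current_sum += scores[j]
--
--            # update most positive
--             if current_sum > best_pos[2]:
--                 best_pos = (i, j, current_sum)
--
--             # update mopst negative
--             if current_sum < best_neg[2]:
--                 best_neg = (i, j, current_sum)
--
--     # Extract actual sentences
--     pos_segment = sentences[best_pos[0]:best_pos[1] + 1]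
--     neg_segment = sentences[best_neg[0]:best_neg[1] + 1]
--
--     return (pos_segment, best_pos[2]), (neg_segment, best_neg[2])
-- ===== SOURCE B (Python) =====
-- def split_words(sentence):
--     clean_sentence = ""
--     for char in sentence:
--         if char.isalpha() or char == " " or char == "-":
--             clean_sentence += char.lower()
--     words = clean_sentence.split()
--     return words
--
-- def sentiment_score(sentence, afinn):
--     words = split_words(sentence)
--     score = 0
--     for word in words:
--         if word in afinn:
--             score = score + afinn[word]
--     return score
--
-- def analyze_arbitrary_segments(sentences, afinn):
--     # One pass (Kadane via running prefix-sum extrema) instead of trying all O(n^2) segments.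
--     scores = [sentiment_score(s, afinn) for s in sentences]
--
--     best_pos = (None, None, float("-inf"))  # (start, end, score)
--     best_neg = (None, None, float("inf"))   # (start, end, score)
--
--     pref = 0            # prefix sum P[j+1] while handling index j
--     min_pref, min_i = 0, 0   # minimal prefix P[i] for i <= j, earliest such i
--     max_pref, max_i = 0, 0   # maximal prefix P[i] for i <= j, earliest such i
--     for j, s in enumerate(scores):
--         pref += s
--         # best segment ending at j: start at the extremal earlier prefix
--         if pref - min_pref > best_pos[2]:
--             best_pos = (min_i, j, pref - min_pref)
--         if pref - max_pref < best_neg[2]: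
--             best_neg = (max_i, j, pref - max_pref)
--         if pref < min_pref:
--             min_pref, min_i = pref, j + 1
--         if pref > max_pref:
--             max_pref, max_i = pref, j + 1
--
--     pos_segment = sentences[best_pos[0]:best_pos[1] + 1]
--     neg_segment = sentences[best_neg[0]:best_neg[1] + 1]
--
--     return (pos_segment, best_pos[2]), (neg_segment, best_neg[2])
-- ===== Notes on version B (the rewrite author's own statement) =====
-- stated objective: faster
-- what changed: Replaces A's O(n^2) try-all-segments double loop with a single-pass Kadane-style scan that tracks running prefix-sum extrema and their earliest indices, reproducing A's first-strict-improvement tie-breaking exactly.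
import Mathlib
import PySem

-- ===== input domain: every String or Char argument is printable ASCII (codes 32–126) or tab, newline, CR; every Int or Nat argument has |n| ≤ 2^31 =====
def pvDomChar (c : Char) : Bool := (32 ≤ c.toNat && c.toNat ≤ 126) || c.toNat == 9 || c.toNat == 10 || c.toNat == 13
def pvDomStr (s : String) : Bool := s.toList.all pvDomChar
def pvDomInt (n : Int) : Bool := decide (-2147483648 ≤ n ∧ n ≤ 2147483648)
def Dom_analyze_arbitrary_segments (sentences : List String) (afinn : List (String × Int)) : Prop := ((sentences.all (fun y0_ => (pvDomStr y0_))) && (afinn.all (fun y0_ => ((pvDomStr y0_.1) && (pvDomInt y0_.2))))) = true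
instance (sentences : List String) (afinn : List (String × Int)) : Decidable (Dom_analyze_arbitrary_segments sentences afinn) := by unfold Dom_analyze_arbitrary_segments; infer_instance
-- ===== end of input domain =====

-- B replaces A's O(n^2) all-segments double loop by a single-pass scan over running
-- prefix-sum extrema (Kadane-style) with identical tie-breaking; objective: faster.

-- ===== PORT A =====
-- helpers shared by both Pythons (same-module helpers split_words / sentiment_score; Source B carries identical copies)
def splitWords (sentence : String) : List String :=
  let clean := sentence.toList.foldl
    (fun acc c => if PySem.Chars.isalpha c || c == ' ' || c == '-' then acc ++ [PySem.Chars.lowerChar c] else acc) []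
  (PySem.Chars.split₀ clean).map String.ofList

def sentimentScore (sentence : String) (afinn : List (String × Int)) : Int :=
  -- Python receives afinn as a dict built from these pairs (later duplicates overwrite)
  let d := PySem.Dict.ofList afinn
  (splitWords sentence).foldl (fun score w => if d.contains w then score + d.getD w 0 else score) 0

-- "strictly better than the current best" tests used by both Pythons ('>' for best_pos, '<' for best_neg)
def pvBeatsHigh (old new : Int) : Bool := decide (old < new)
def pvBeatsLow (old new : Int) : Bool := decide (new < old)

-- one update of a best (start, end, score) triple; none models the initial float("±inf")
-- sentinel, which every int beats
def pvBestStep (bt : Int → Int → Bool) (best : Option (Nat × Nat × Int)) (c : Nat × Nat × Int) :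
    Option (Nat × Nat × Int) :=
  match best with
  | none => some c
  | some t => if bt t.2.2 c.2.2 then some c else best

-- the shared final lines: slice the sentences with the recorded boundaries.
-- If no segment was recorded (empty input) the Pythons raise TypeError (None + 1):
-- that input is outside Pre_; the port returns a default there.
def pvExtract (sentences : List String) (r : Option (Nat × Nat × Int) × Option (Nat × Nat × Int)) :
    (List String × Int) × (List String × Int) :=
  match r with
  | (some p, some q) =>
    ((PySem.List.slice sentences (some (p.1 : Int)) (some ((p.2.1 : Int) + 1)), p.2.2),
     (PySem.List.slice sentences (some (q.1 : Int)) (some ((q.2.1 : Int) + 1)), q.2.2))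
  | _ => (([], 0), ([], 0))

-- body of A's inner loop: current_sum += scores[j]; update best_pos; update best_neg
def pvInnerStep (scores : List Int) (i : Nat)
    (st : Int × Option (Nat × Nat × Int) × Option (Nat × Nat × Int)) (j : Nat) :
    Int × Option (Nat × Nat × Int) × Option (Nat × Nat × Int) :=
  let cur := st.1 + scores.getD j 0   -- scores[j]: j < len(scores) on every iteration
  (cur, pvBestStep pvBeatsHigh st.2.1 (i, j, cur), pvBestStep pvBeatsLow st.2.2 (i, j, cur))

def analyze_arbitrary_segments (sentences : List String) (afinn : List (String × Int)) :
    (List String × Int) × (List String × Int) :=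
  let scores := sentences.map (fun s => sentimentScore s afinn)
  let n := scores.length
  let r := (List.range' 0 n).foldl
    (fun (b : Option (Nat × Nat × Int) × Option (Nat × Nat × Int)) i =>
      ((List.range' i (n - i)).foldl (pvInnerStep scores i) ((0 : Int), b.1, b.2)).2)
    (none, none)
  pvExtract sentences r

-- ===== PORT B =====
structure pvKState where
  pref : Int
  minP : Int
  minI : Nat
  maxP : Int
  maxI : Nat
  bp : Option (Nat × Nat × Int)
  bn : Option (Nat × Nat × Int)
deriving Repr, DecidableEq

-- body of B's single loop (Source B): extend prefix sum, try the segment ending at j that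
-- starts at the recorded extremal prefix, then update the prefix extrema
def pvKadStep (st : pvKState) (sj : Int × Nat) : pvKState :=
  let pref := st.pref + sj.1
  let bp := pvBestStep pvBeatsHigh st.bp (st.minI, sj.2, pref - st.minP)
  let bn := pvBestStep pvBeatsLow st.bn (st.maxI, sj.2, pref - st.maxP)
  { pref := pref
    minP := if pref < st.minP then pref else st.minP
    minI := if pref < st.minP then sj.2 + 1 else st.minI
    maxP := if st.maxP < pref then pref else st.maxP
    maxI := if st.maxP < pref then sj.2 + 1 else st.maxI
    bp := bp
    bn := bn }

def analyze_arbitrary_segments_alt (sentences : List String) (afinn : List (String × Int)) :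
    (List String × Int) × (List String × Int) :=
  let scores := sentences.map (fun s => sentimentScore s afinn)
  let st := scores.zipIdx.foldl pvKadStep ⟨0, 0, 0, 0, 0, none, none⟩
  pvExtract sentences (st.bp, st.bn)

-- ===== PRECONDITION & SPEC =====
-- Pre_ excludes only the empty sentences list, on which the Python A raises
-- TypeError (slicing with start None and None + 1).
def Pre_analyze_arbitrary_segments (sentences : List String) (afinn : List (String × Int)) : Prop :=
  sentences ≠ []
instance (sentences : List String) (afinn : List (String × Int)) :
    Decidable (Pre_analyze_arbitrary_segments sentences afinn) := by
  unfold Pre_analyze_arbitrary_segments; infer_instance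

def pvWitness_analyze_arbitrary_segments : List String × (List (String × Int)) :=
  (["good day", "bad luck"], [("good", 3), ("bad", -2)])

def Spec_analyze_arbitrary_segments (sentences : List String) (afinn : List (String × Int))
    (out : (List String × Int) × (List String × Int)) : Prop :=
  out = analyze_arbitrary_segments_alt sentences afinn
instance (sentences : List String) (afinn : List (String × Int))
    (out : (List String × Int) × (List String × Int)) :
    Decidable (Spec_analyze_arbitrary_segments sentences afinn out) := by
  unfold Spec_analyze_arbitrary_segments; infer_instance

-- ===== CLAIM (what is proved, stated in full; the proofs are below) =====
def Claim_equal_analyze_arbitrary_segments : Prop := ∀ (sentences : List String) (afinn : List (String × Int)), Dom_analyze_arbitrary_segments sentences afinn → Pre_analyze_arbitrary_segments sentences afinn → Spec_analyze_arbitrary_segments sentences afinn (analyze_arbitrary_segments sentences afinn)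

-- ===== LEMMAS AND PROOFS =====

def pvP (xs : List Int) (k : Nat) : Int := (xs.take k).sum
def pvMinPre (xs : List Int) : Nat → Int
  | 0 => 0
  | j + 1 => if pvP xs (j + 1) < pvMinPre xs j then pvP xs (j + 1) else pvMinPre xs j
def pvArgMin (xs : List Int) : Nat → Nat
  | 0 => 0
  | j + 1 => if pvP xs (j + 1) < pvMinPre xs j then j + 1 else pvArgMin xs j
def pvMaxPre (xs : List Int) : Nat → Int
  | 0 => 0
  | j + 1 => if pvMaxPre xs j < pvP xs (j + 1) then pvP xs (j + 1) else pvMaxPre xs j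
def pvArgMax (xs : List Int) : Nat → Nat
  | 0 => 0
  | j + 1 => if pvMaxPre xs j < pvP xs (j + 1) then j + 1 else pvArgMax xs j
def pvV (xs : List Int) (i j : Nat) : Int := pvP xs (j + 1) - pvP xs i
def pvE (xs : List Int) (j : Nat) : Int := pvP xs (j + 1) - pvMinPre xs j
def pvEn (xs : List Int) (j : Nat) : Int := pvP xs (j + 1) - pvMaxPre xs j

lemma pvP_succ (xs : List Int) (k : Nat) (h : k < xs.length) :
    pvP xs (k + 1) = pvP xs k + xs.getD k 0 := by
  unfold pvP
  rw [List.take_add_one, List.sum_append]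
  simp [List.getElem?_eq_getElem h, List.getD]

lemma pvBruteInner (xs : List Int) (i : Nat) :
    ∀ (m j0 : Nat), j0 + m ≤ xs.length →
      ∀ (c : Int) (bp bn : Option (Nat × Nat × Int)), c = pvP xs j0 - pvP xs i →
      (List.range' j0 m).foldl (pvInnerStep xs i) (c, bp, bn) =
        (pvP xs (j0 + m) - pvP xs i,
         ((List.range' j0 m).map (fun j => (i, j, pvV xs i j))).foldl (pvBestStep pvBeatsHigh) bp,
         ((List.range' j0 m).map (fun j => (i, j, pvV xs i j))).foldl (pvBestStep pvBeatsLow) bn) := by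
  intro m
  induction m with
  | zero => intro j0 _ c bp bn hc; simp [hc]
  | succ m ih =>
    intro j0 hle c bp bn hc
    rw [List.range'_succ, List.foldl_cons, List.map_cons, List.foldl_cons]
    have hcur : c + xs.getD j0 0 = pvV xs i j0 := by
      unfold pvV; rw [hc, pvP_succ xs j0 (by omega)]; ring
    show (List.range' (j0+1) m).foldl (pvInnerStep xs i)
        (c + xs.getD j0 0,
         pvBestStep pvBeatsHigh bp (i, j0, c + xs.getD j0 0),
         pvBestStep pvBeatsLow bn (i, j0, c + xs.getD j0 0)) = _
    rw [hcur]
    rw [ih (j0+1) (by omega) _ _ _ (by unfold pvV; ring)]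
    have h3 : j0 + 1 + m = j0 + (m + 1) := by omega
    rw [h3]
    rfl

lemma pvBruteOuter (xs : List Int) :
    ∀ (is : List Nat), (∀ i ∈ is, i ≤ xs.length) →
      ∀ (bp bn : Option (Nat × Nat × Int)),
      is.foldl (fun (b : Option (Nat × Nat × Int) × Option (Nat × Nat × Int)) i =>
          ((List.range' i (xs.length - i)).foldl (pvInnerStep xs i) ((0 : Int), b.1, b.2)).2) (bp, bn) =
        ((is.flatMap (fun i => (List.range' i (xs.length - i)).map (fun j => (i, j, pvV xs i j)))).foldl
            (pvBestStep pvBeatsHigh) bp,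
         (is.flatMap (fun i => (List.range' i (xs.length - i)).map (fun j => (i, j, pvV xs i j)))).foldl
            (pvBestStep pvBeatsLow) bn) := by
  intro is
  induction is with
  | nil => intro _ bp bn; rfl
  | cons i t ih =>
    intro hmem bp bn
    rw [List.foldl_cons, List.flatMap_cons, List.foldl_append, List.foldl_append]
    have hi : i ≤ xs.length := hmem i List.mem_cons_self
    rw [pvBruteInner xs i (xs.length - i) i (by omega) 0 bp bn (by simp)]
    exact ih (fun j hj => hmem j (List.mem_cons_of_mem _ hj)) _ _

lemma pvKadInv (xs : List Int) :
    ∀ k, k ≤ xs.length →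
      (xs.zipIdx.take k).foldl pvKadStep ⟨0, 0, 0, 0, 0, none, none⟩ =
        ⟨pvP xs k, pvMinPre xs k, pvArgMin xs k, pvMaxPre xs k, pvArgMax xs k,
         ((List.range' 0 k).map (fun j => (pvArgMin xs j, j, pvE xs j))).foldl (pvBestStep pvBeatsHigh) none,
         ((List.range' 0 k).map (fun j => (pvArgMax xs j, j, pvEn xs j))).foldl (pvBestStep pvBeatsLow) none⟩ := by
  intro k
  induction k with
  | zero => intro _; rfl
  | succ k ih =>
    intro hle
    have hk : k < xs.length := by omega
    have hz : xs.zipIdx[k]? = some (xs[k], k) := by simp [hk]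
    rw [List.take_add_one, hz]
    show ((xs.zipIdx.take k) ++ [(xs[k], k)]).foldl pvKadStep _ = _
    rw [List.foldl_append, ih (by omega), List.foldl_cons, List.foldl_nil]
    rw [List.range'_1_concat, List.map_append, List.map_append, List.foldl_append, List.foldl_append]
    simp only [Nat.zero_add, List.map_cons, List.map_nil, List.foldl_cons, List.foldl_nil]
    have hpref : pvP xs k + xs[k] = pvP xs (k+1) := by
      rw [pvP_succ xs k hk]; simp [List.getD, List.getElem?_eq_getElem hk]
    simp only [pvKadStep, hpref]
    rfl

lemma pvStep_none_or_mem (bt : Int → Int → Bool) (L : List (Nat × Nat × Int)) :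
    ∀ b, L.foldl (pvBestStep bt) b = b ∨ ∃ c ∈ L, L.foldl (pvBestStep bt) b = some c := by
  induction L with
  | nil => intro b; left; rfl
  | cons c t ih =>
    intro b
    rw [List.foldl_cons]
    rcases ih (pvBestStep bt b c) with h | ⟨d, hd, h⟩
    · rw [h]
      unfold pvBestStep
      match b with
      | none => exact Or.inr ⟨c, List.mem_cons_self, rfl⟩
      | some t0 =>
        by_cases hb : bt t0.2.2 c.2.2 = true
        · simp [hb]
        · simp [hb]
    · exact Or.inr ⟨d, List.mem_cons_of_mem _ hd, h⟩

lemma pvStep_stay (bt : Int → Int → Bool) (t : Nat × Nat × Int) :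
    ∀ L : List (Nat × Nat × Int), (∀ c ∈ L, bt t.2.2 c.2.2 = false) →
      L.foldl (pvBestStep bt) (some t) = some t := by
  intro L
  induction L with
  | nil => intro _; rfl
  | cons c l ih =>
    intro h
    rw [List.foldl_cons]
    have hc : bt t.2.2 c.2.2 = false := h c List.mem_cons_self
    have : pvBestStep bt (some t) c = some t := by unfold pvBestStep; simp [hc]
    rw [this]
    exact ih (fun d hd => h d (List.mem_cons_of_mem _ hd))

lemma pvStep_first (bt : Int → Int → Bool) (L1 L2 : List (Nat × Nat × Int)) (c0 : Nat × Nat × Int)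
    (h1 : ∀ c ∈ L1, bt c.2.2 c0.2.2 = true) (h2 : ∀ c ∈ L2, bt c0.2.2 c.2.2 = false) :
    (L1 ++ c0 :: L2).foldl (pvBestStep bt) none = some c0 := by
  rw [List.foldl_append, List.foldl_cons]
  have hstep : pvBestStep bt (L1.foldl (pvBestStep bt) none) c0 = some c0 := by
    rcases pvStep_none_or_mem bt L1 none with h | ⟨d, hd, h⟩
    · rw [h]; rfl
    · rw [h]; unfold pvBestStep; simp [h1 d hd]
  rw [hstep]
  exact pvStep_stay bt c0 L2 h2

lemma pvMinPre_le (xs : List Int) : ∀ j i, i ≤ j → pvMinPre xs j ≤ pvP xs i := by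
  intro j
  induction j with
  | zero => intro i hi; interval_cases i; simp [pvMinPre, pvP]
  | succ j ih =>
    intro i hi
    unfold pvMinPre
    rcases Nat.lt_or_ge i (j + 1) with h | h
    · have := ih i (by omega)
      split_ifs with hc <;> omega
    · have : i = j + 1 := by omega
      subst this
      split_ifs with hc <;> omega

lemma pvArgMin_le (xs : List Int) (j : Nat) : pvArgMin xs j ≤ j := by
  induction j with
  | zero => simp [pvArgMin]
  | succ j ih => unfold pvArgMin; split_ifs <;> omega

lemma pvP_pvArgMin (xs : List Int) (j : Nat) : pvP xs (pvArgMin xs j) = pvMinPre xs j := by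
  induction j with
  | zero => simp [pvArgMin, pvMinPre, pvP]
  | succ j ih =>
    by_cases hc : pvP xs (j + 1) < pvMinPre xs j
    · simp [pvArgMin, pvMinPre, hc]
    · simp [pvArgMin, pvMinPre, hc, ih]

lemma pvArgMin_lt (xs : List Int) : ∀ j i, i < pvArgMin xs j → pvMinPre xs j < pvP xs i := by
  intro j
  induction j with
  | zero => intro i hi; simp [pvArgMin] at hi
  | succ j ih =>
    intro i hi
    by_cases hc : pvP xs (j + 1) < pvMinPre xs j
    · simp only [pvArgMin, pvMinPre, if_pos hc] at hi ⊢
      have := pvMinPre_le xs j i (by omega)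
      omega
    · simp only [pvArgMin, pvMinPre, if_neg hc] at hi ⊢
      exact ih i hi


lemma pvMaxPre_ge (xs : List Int) : ∀ j i, i ≤ j → pvP xs i ≤ pvMaxPre xs j := by
  intro j
  induction j with
  | zero => intro i hi; interval_cases i; simp [pvMaxPre, pvP]
  | succ j ih =>
    intro i hi
    unfold pvMaxPre
    rcases Nat.lt_or_ge i (j + 1) with h | h
    · have := ih i (by omega)
      split_ifs with hc <;> omega
    · have : i = j + 1 := by omega
      subst this
      split_ifs with hc <;> omega

lemma pvArgMax_le (xs : List Int) (j : Nat) : pvArgMax xs j ≤ j := by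
  induction j with
  | zero => simp [pvArgMax]
  | succ j ih => unfold pvArgMax; split_ifs <;> omega

lemma pvP_pvArgMax (xs : List Int) (j : Nat) : pvP xs (pvArgMax xs j) = pvMaxPre xs j := by
  induction j with
  | zero => simp [pvArgMax, pvMaxPre, pvP]
  | succ j ih =>
    by_cases hc : pvMaxPre xs j < pvP xs (j + 1)
    · simp [pvArgMax, pvMaxPre, hc]
    · simp [pvArgMax, pvMaxPre, hc, ih]

lemma pvArgMax_lt (xs : List Int) : ∀ j i, i < pvArgMax xs j → pvP xs i < pvMaxPre xs j := by
  intro j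
  induction j with
  | zero => intro i hi; simp [pvArgMax] at hi
  | succ j ih =>
    intro i hi
    by_cases hc : pvMaxPre xs j < pvP xs (j + 1)
    · simp only [pvArgMax, pvMaxPre, if_pos hc] at hi ⊢
      have := pvMaxPre_ge xs j i (by omega)
      omega
    · simp only [pvArgMax, pvMaxPre, if_neg hc] at hi ⊢
      exact ih i hi

lemma pvE_le (xs : List Int) (i j : Nat) (hij : i ≤ j) : pvV xs i j ≤ pvE xs j := by
  have := pvMinPre_le xs j i hij
  unfold pvV pvE
  omega

lemma pvEn_ge (xs : List Int) (i j : Nat) (hij : i ≤ j) : pvEn xs j ≤ pvV xs i j := by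
  have := pvMaxPre_ge xs j i hij
  unfold pvV pvEn
  omega

def pvLA (xs : List Int) : List (Nat × Nat × Int) :=
  (List.range' 0 xs.length).flatMap
    (fun i => (List.range' i (xs.length - i)).map (fun j => (i, j, pvV xs i j)))
def pvLB (xs : List Int) : List (Nat × Nat × Int) :=
  (List.range' 0 xs.length).map (fun j => (pvArgMin xs j, j, pvE xs j))
def pvLBn (xs : List Int) : List (Nat × Nat × Int) :=
  (List.range' 0 xs.length).map (fun j => (pvArgMax xs j, j, pvEn xs j))

lemma pvRangeSplit (a m : Nat) (h : a ≤ m) : List.range' 0 m = List.range' 0 a ++ List.range' a (m - a) := by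
  have := List.range'_append_1 (s := 0) (m := a) (n := m - a)
  simp only [Nat.zero_add] at this
  rw [this, Nat.add_sub_cancel' h]

lemma pvRangeCons (a m : Nat) (h : a < m) : List.range' a (m - a) = a :: List.range' (a + 1) (m - a - 1) := by
  calc List.range' a (m - a) = List.range' a ((m - a - 1) + 1) := by
        congr 1; omega
    _ = a :: List.range' (a + 1) (m - a - 1) := by rw [List.range'_succ]

lemma pvRangeSplitAt (a b m : Nat) (hab : a ≤ b) (hbm : b ≤ m) :
    List.range' a (m - a) = List.range' a (b - a) ++ List.range' b (m - b) := by
  have := List.range'_append_1 (s := a) (m := b - a) (n := m - b)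
  rw [Nat.add_sub_cancel' hab] at this
  rw [this]
  congr 1
  omega

lemma pvCoreMax (xs : List Int) (h : xs ≠ []) :
    (pvLA xs).foldl (pvBestStep pvBeatsHigh) none = (pvLB xs).foldl (pvBestStep pvBeatsHigh) none := by
  have hn0 : 0 < xs.length := List.length_pos_of_ne_nil h
  have hex : ∃ j, j < xs.length ∧ ∀ k, k < xs.length → pvE xs k ≤ pvE xs j := by
    obtain ⟨j, hj, hmax⟩ := Finset.exists_max_image (Finset.range xs.length) (pvE xs)
      ⟨0, Finset.mem_range.2 hn0⟩
    exact ⟨j, Finset.mem_range.1 hj, fun k hk => hmax k (Finset.mem_range.2 hk)⟩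
  obtain ⟨hjs_lt, hjs_max⟩ := Nat.find_spec hex
  set js := Nat.find hex with hjs_def
  have hstrict : ∀ j, j < js → pvE xs j < pvE xs js := by
    intro j hj
    have hnot := Nat.find_min hex hj
    push_neg at hnot
    obtain ⟨k, hk, hlt⟩ := hnot (lt_trans hj hjs_lt)
    exact lt_of_lt_of_le hlt (hjs_max k hk)
  set is := pvArgMin xs js with his_def
  have his_le : is ≤ js := pvArgMin_le xs js
  have hc0 : pvV xs is js = pvE xs js := by
    unfold pvV pvE
    rw [his_def, pvP_pvArgMin]
  have hVle : ∀ i j, i ≤ j → j < xs.length → pvV xs i j ≤ pvE xs js :=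
    fun i j hij hj => le_trans (pvE_le xs i j hij) (hjs_max j hj)
  have hL1 : ∀ i j, i ≤ j → j < xs.length → (i < is ∨ (i = is ∧ j < js)) →
      pvV xs i j < pvE xs js := by
    intro i j hij hjn hcase
    rcases hcase with hi | ⟨hieq, hj⟩
    · have hPis : pvP xs is = pvMinPre xs js := by rw [his_def, pvP_pvArgMin]
      have hPi : pvMinPre xs js < pvP xs i := pvArgMin_lt xs js i hi
      rcases Nat.lt_or_ge j js with hjlt | hjge
      · exact lt_of_le_of_lt (pvE_le xs i j hij) (hstrict j hjlt)
      · have h1 : pvV xs i j < pvV xs is j := by unfold pvV; omega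
        have h2 : pvV xs is j ≤ pvE xs j := pvE_le xs is j (le_trans his_le hjge)
        have h3 : pvE xs j ≤ pvE xs js := hjs_max j hjn
        omega
    · exact lt_of_le_of_lt (pvE_le xs i j hij) (hstrict j hj)
  -- decompose pvLB
  have hB : (pvLB xs).foldl (pvBestStep pvBeatsHigh) none = some (is, js, pvE xs js) := by
    unfold pvLB
    rw [pvRangeSplit js xs.length (le_of_lt hjs_lt), pvRangeCons js xs.length hjs_lt,
      List.map_append, List.map_cons]
    apply pvStep_first
    · intro c hc
      obtain ⟨j, hj, rfl⟩ := List.mem_map.1 hc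
      rw [List.mem_range'_1] at hj
      simp only [pvBeatsHigh, decide_eq_true_eq]
      exact hstrict j (by omega)
    · intro c hc
      obtain ⟨j, hj, rfl⟩ := List.mem_map.1 hc
      rw [List.mem_range'_1] at hj
      simp only [pvBeatsHigh, decide_eq_false_iff_not, not_lt]
      exact hjs_max j (by omega)
  -- decompose pvLA
  have hA : (pvLA xs).foldl (pvBestStep pvBeatsHigh) none = some (is, js, pvE xs js) := by
    unfold pvLA
    rw [pvRangeSplit is xs.length (by omega), List.flatMap_append,
      pvRangeCons is xs.length (by omega), List.flatMap_cons,
      pvRangeSplitAt is js xs.length his_le (le_of_lt hjs_lt),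
      List.map_append, pvRangeCons js xs.length hjs_lt, List.map_cons]
    have hre :
        (List.range' 0 is).flatMap (fun i => (List.range' i (xs.length - i)).map (fun j => (i, j, pvV xs i j))) ++
          (((List.range' is (js - is)).map (fun j => (is, j, pvV xs is j)) ++
            (is, js, pvV xs is js) :: (List.range' (js + 1) (xs.length - js - 1)).map (fun j => (is, j, pvV xs is j))) ++
           (List.range' (is + 1) (xs.length - is - 1)).flatMap (fun i => (List.range' i (xs.length - i)).map (fun j => (i, j, pvV xs i j)))) =
        ((List.range' 0 is).flatMap (fun i => (List.range' i (xs.length - i)).map (fun j => (i, j, pvV xs i j))) ++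
          (List.range' is (js - is)).map (fun j => (is, j, pvV xs is j))) ++
        (is, js, pvV xs is js) ::
          ((List.range' (js + 1) (xs.length - js - 1)).map (fun j => (is, j, pvV xs is j)) ++
           (List.range' (is + 1) (xs.length - is - 1)).flatMap (fun i => (List.range' i (xs.length - i)).map (fun j => (i, j, pvV xs i j)))) := by
      simp [List.append_assoc]
    rw [hre, ← hc0]
    apply pvStep_first
    · intro c hc
      rcases List.mem_append.1 hc with hcX | hcY
      · obtain ⟨i, hi, hci⟩ := List.mem_flatMap.1 hcX
        obtain ⟨j, hj, rfl⟩ := List.mem_map.1 hci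
        rw [List.mem_range'_1] at hi hj
        simp only [pvBeatsHigh, decide_eq_true_eq, hc0]
        exact hL1 i j (by omega) (by omega) (Or.inl (by omega))
      · obtain ⟨j, hj, rfl⟩ := List.mem_map.1 hcY
        rw [List.mem_range'_1] at hj
        simp only [pvBeatsHigh, decide_eq_true_eq, hc0]
        exact hL1 is j (by omega) (by omega) (Or.inr ⟨rfl, by omega⟩)
    · intro c hc
      rcases List.mem_append.1 hc with hcZ | hcW
      · obtain ⟨j, hj, rfl⟩ := List.mem_map.1 hcZ
        rw [List.mem_range'_1] at hj
        simp only [pvBeatsHigh, decide_eq_false_iff_not, not_lt, hc0]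
        exact hVle is j (by omega) (by omega)
      · obtain ⟨i, hi, hci⟩ := List.mem_flatMap.1 hcW
        obtain ⟨j, hj, rfl⟩ := List.mem_map.1 hci
        rw [List.mem_range'_1] at hi hj
        simp only [pvBeatsHigh, decide_eq_false_iff_not, not_lt, hc0]
        exact hVle i j (by omega) (by omega)
  rw [hA, hB]

lemma pvCoreMin (xs : List Int) (h : xs ≠ []) :
    (pvLA xs).foldl (pvBestStep pvBeatsLow) none = (pvLBn xs).foldl (pvBestStep pvBeatsLow) none := by
  have hn0 : 0 < xs.length := List.length_pos_of_ne_nil h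
  have hex : ∃ j, j < xs.length ∧ ∀ k, k < xs.length → pvEn xs j ≤ pvEn xs k := by
    obtain ⟨j, hj, hmin⟩ := Finset.exists_min_image (Finset.range xs.length) (pvEn xs)
      ⟨0, Finset.mem_range.2 hn0⟩
    exact ⟨j, Finset.mem_range.1 hj, fun k hk => hmin k (Finset.mem_range.2 hk)⟩
  obtain ⟨hjs_lt, hjs_min⟩ := Nat.find_spec hex
  set js := Nat.find hex with hjs_def
  have hstrict : ∀ j, j < js → pvEn xs js < pvEn xs j := by
    intro j hj
    have hnot := Nat.find_min hex hj
    push_neg at hnot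
    obtain ⟨k, hk, hlt⟩ := hnot (lt_trans hj hjs_lt)
    exact lt_of_le_of_lt (hjs_min k hk) hlt
  set is := pvArgMax xs js with his_def
  have his_le : is ≤ js := pvArgMax_le xs js
  have hc0 : pvV xs is js = pvEn xs js := by
    unfold pvV pvEn
    rw [his_def, pvP_pvArgMax]
  have hVge : ∀ i j, i ≤ j → j < xs.length → pvEn xs js ≤ pvV xs i j :=
    fun i j hij hj => le_trans (hjs_min j hj) (pvEn_ge xs i j hij)
  have hL1 : ∀ i j, i ≤ j → j < xs.length → (i < is ∨ (i = is ∧ j < js)) →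
      pvEn xs js < pvV xs i j := by
    intro i j hij hjn hcase
    rcases hcase with hi | ⟨hieq, hj⟩
    · have hPis : pvP xs is = pvMaxPre xs js := by rw [his_def, pvP_pvArgMax]
      have hPi : pvP xs i < pvMaxPre xs js := pvArgMax_lt xs js i hi
      rcases Nat.lt_or_ge j js with hjlt | hjge
      · exact lt_of_lt_of_le (hstrict j hjlt) (pvEn_ge xs i j hij)
      · have h1 : pvV xs is j < pvV xs i j := by unfold pvV; omega
        have h2 : pvEn xs j ≤ pvV xs is j := pvEn_ge xs is j (le_trans his_le hjge)
        have h3 : pvEn xs js ≤ pvEn xs j := hjs_min j hjn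
        omega
    · exact lt_of_lt_of_le (hstrict j hj) (pvEn_ge xs i j hij)
  have hB : (pvLBn xs).foldl (pvBestStep pvBeatsLow) none = some (is, js, pvEn xs js) := by
    unfold pvLBn
    rw [pvRangeSplit js xs.length (le_of_lt hjs_lt), pvRangeCons js xs.length hjs_lt,
      List.map_append, List.map_cons]
    apply pvStep_first
    · intro c hc
      obtain ⟨j, hj, rfl⟩ := List.mem_map.1 hc
      rw [List.mem_range'_1] at hj
      simp only [pvBeatsLow, decide_eq_true_eq]
      exact hstrict j (by omega)
    · intro c hc
      obtain ⟨j, hj, rfl⟩ := List.mem_map.1 hc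
      rw [List.mem_range'_1] at hj
      simp only [pvBeatsLow, decide_eq_false_iff_not, not_lt]
      exact hjs_min j (by omega)
  have hA : (pvLA xs).foldl (pvBestStep pvBeatsLow) none = some (is, js, pvEn xs js) := by
    unfold pvLA
    rw [pvRangeSplit is xs.length (by omega), List.flatMap_append,
      pvRangeCons is xs.length (by omega), List.flatMap_cons,
      pvRangeSplitAt is js xs.length his_le (le_of_lt hjs_lt),
      List.map_append, pvRangeCons js xs.length hjs_lt, List.map_cons]
    have hre :
        (List.range' 0 is).flatMap (fun i => (List.range' i (xs.length - i)).map (fun j => (i, j, pvV xs i j))) ++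
          (((List.range' is (js - is)).map (fun j => (is, j, pvV xs is j)) ++
            (is, js, pvV xs is js) :: (List.range' (js + 1) (xs.length - js - 1)).map (fun j => (is, j, pvV xs is j))) ++
           (List.range' (is + 1) (xs.length - is - 1)).flatMap (fun i => (List.range' i (xs.length - i)).map (fun j => (i, j, pvV xs i j)))) =
        ((List.range' 0 is).flatMap (fun i => (List.range' i (xs.length - i)).map (fun j => (i, j, pvV xs i j))) ++
          (List.range' is (js - is)).map (fun j => (is, j, pvV xs is j))) ++
        (is, js, pvV xs is js) ::
          ((List.range' (js + 1) (xs.length - js - 1)).map (fun j => (is, j, pvV xs is j)) ++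
           (List.range' (is + 1) (xs.length - is - 1)).flatMap (fun i => (List.range' i (xs.length - i)).map (fun j => (i, j, pvV xs i j)))) := by
      simp [List.append_assoc]
    rw [hre, ← hc0]
    apply pvStep_first
    · intro c hc
      rcases List.mem_append.1 hc with hcX | hcY
      · obtain ⟨i, hi, hci⟩ := List.mem_flatMap.1 hcX
        obtain ⟨j, hj, rfl⟩ := List.mem_map.1 hci
        rw [List.mem_range'_1] at hi hj
        simp only [pvBeatsLow, decide_eq_true_eq, hc0]
        exact hL1 i j (by omega) (by omega) (Or.inl (by omega))
      · obtain ⟨j, hj, rfl⟩ := List.mem_map.1 hcY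
        rw [List.mem_range'_1] at hj
        simp only [pvBeatsLow, decide_eq_true_eq, hc0]
        exact hL1 is j (by omega) (by omega) (Or.inr ⟨rfl, by omega⟩)
    · intro c hc
      rcases List.mem_append.1 hc with hcZ | hcW
      · obtain ⟨j, hj, rfl⟩ := List.mem_map.1 hcZ
        rw [List.mem_range'_1] at hj
        simp only [pvBeatsLow, decide_eq_false_iff_not, not_lt, hc0]
        exact hVge is j (by omega) (by omega)
      · obtain ⟨i, hi, hci⟩ := List.mem_flatMap.1 hcW
        obtain ⟨j, hj, rfl⟩ := List.mem_map.1 hci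
        rw [List.mem_range'_1] at hi hj
        simp only [pvBeatsLow, decide_eq_false_iff_not, not_lt, hc0]
        exact hVge i j (by omega) (by omega)
  rw [hA, hB]

-- ===== VERDICT (by name: the statement is the Claim_ definition above) =====
theorem analyze_arbitrary_segments_spec : Claim_equal_analyze_arbitrary_segments := by
  intro sentences afinn _ hpre
  unfold Spec_analyze_arbitrary_segments
  have hpre' : sentences ≠ [] := hpre
  unfold analyze_arbitrary_segments analyze_arbitrary_segments_alt
  set xs := sentences.map (fun s => sentimentScore s afinn) with hxs_def
  have hxs : xs ≠ [] := by
    rw [hxs_def]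
    simpa using hpre'
  have hbrute := pvBruteOuter xs (List.range' 0 xs.length)
    (by intro i hi; rw [List.mem_range'_1] at hi; omega) none none
  have htake : xs.zipIdx.take xs.length = xs.zipIdx := by
    rw [← List.length_zipIdx (l := xs)]
    exact List.take_length
  have hkad := pvKadInv xs xs.length le_rfl
  rw [htake] at hkad
  dsimp only
  rw [hbrute, hkad]
  show pvExtract sentences
      ((pvLA xs).foldl (pvBestStep pvBeatsHigh) none, (pvLA xs).foldl (pvBestStep pvBeatsLow) none) = _
  rw [pvCoreMax xs hxs, pvCoreMin xs hxs]
  rfl
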